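-- pv_equiv track=rewrite | github.com/YuanzhongLi/Practice_Competitive_Programming_Python | LeetCode/problems/1370.py | sortString
-- ===== SOURCE A (Python) =====
-- def sortString(s: str) -> str:
--     N = len(s)
--     mem = [0 for _ in range(26)]
--     ord_a = ord('a')
--     for ch in s:
--         mem[ord(ch) - ord_a] += 1
--
--     ret = ''
--     state = 0
--     while N > 0:
--         if state == 0:
--             for i in range(26):
--                 if mem[i] > 0:
--                     ret += chr(i + ord_a)
--                     mem[i] -= 1
--                     N -= 1
--
--             state = 1
--         else: # state = 1
--             for i in range(25, -1, -1):
--                 if mem[i] > 0: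
--                     ret += chr(i + ord_a)
--                     mem[i] -= 1
--                     N -= 1
--
--             state = 0
--
--     return ret
-- ===== SOURCE B (Python) =====
-- def sortString(s: str) -> str:
--     # Decorate each character with its occurrence index k (how many copies of it
--     # came before): the k-th copy of a letter belongs to the k-th zig-zag round.
--     # One stable sort by a single integer key then puts every character in place:
--     # rounds in increasing order (k * 256), ascending by code inside an even
--     # round, descending (255 - code) inside an odd round.
--     occ = {}
--     pairs = []
--     for ch in s:
--         k = occ.get(ch, 0)
--         occ[ch] = k + 1
--         pairs.append((k, ch))
--     pairs.sort(key=lambda p: p[0] * 256 + (ord(p[1]) if p[0] % 2 == 0 else 255 - ord(p[1])))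
--     return ''.join(ch for _, ch in pairs)
-- ===== Notes on version B (the rewrite author's own statement) =====
-- stated objective: alternative
-- what changed: B replaces A's round-by-round zig-zag simulation (26-slot count array destructively decremented, a remaining-character counter and an asc/desc state toggle) by decorate-sort-undecorate: each character is tagged with its occurrence index k in one pass over s, then a single stable sort by one integer key (k*256 + code for even k, k*256 + 255 - code for odd k) arranges the whole output at once.
-- intended difference: On strings containing a character with code 71 to 96 (most uppercase letters), A's negative-index wraparound silently counts it into the slot of an unrelated lowercase letter and returns that lowercase letter in its place, while B keeps the character itself, which is the intended grouping; the proved witness records both outputs. — e.g. on sortString("Z"): A returns "t", B returns "Z"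
import Mathlib
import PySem

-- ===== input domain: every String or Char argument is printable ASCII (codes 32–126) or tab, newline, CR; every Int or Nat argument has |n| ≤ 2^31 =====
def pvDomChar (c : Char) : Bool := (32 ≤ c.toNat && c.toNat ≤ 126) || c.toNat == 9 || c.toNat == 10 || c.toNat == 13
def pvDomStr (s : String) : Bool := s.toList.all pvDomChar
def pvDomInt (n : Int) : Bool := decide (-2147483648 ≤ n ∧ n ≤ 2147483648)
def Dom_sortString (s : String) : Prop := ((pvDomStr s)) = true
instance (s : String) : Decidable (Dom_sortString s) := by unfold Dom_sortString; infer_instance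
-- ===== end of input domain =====

-- B replaces A's zig-zag round simulation (destructive 26-slot decrements, remaining counter,
-- direction toggle) by decorate-sort-undecorate: tag each character with its occurrence index and
-- do ONE stable sort by a single integer key (objective: alternative). On characters with code
-- 71..96 A's negative-index wraparound returns an unrelated lowercase letter; B keeps the
-- character itself (intended difference D_ below).


-- ===== PORT A =====
-- 'for ch in s: mem[ord(ch) - ord_a] += 1'  (Python negative-index semantics; none = IndexError)
def pvCountA (cs : List Char) (mem : List Int) : Option (List Int) :=
  cs.foldlM (fun m c =>
    PySem.List.pySet? m ((c.toNat : Int) - 97)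
      (PySem.List.pyGetD m ((c.toNat : Int) - 97) 0 + 1)) mem

-- body of both inner 'for i in …' loops: if mem[i] > 0: emit chr(i + ord_a), decrement, N -= 1
-- (Char.ofNat is exact here: the loops only visit i = 0..25, so the code is 97..122)
def pvStepA (st : List Int × List Char × Int) (i : Int) : List Int × List Char × Int :=
  if 0 < PySem.List.pyGetD st.1 i 0 then
    (PySem.List.pySetD st.1 i (PySem.List.pyGetD st.1 i 0 - 1),
     st.2.1 ++ [Char.ofNat (i.toNat + 97)], st.2.2 - 1)
  else st

-- 'while N > 0: …' with the state toggle; fuel is a totality guard only (each pass strictly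
-- decreases N while N > 0 and |s| passes always suffice — proved below), not a change of algorithm
def pvLoopA : Nat → Int → List Int × List Char × Int → List Char
  | fuel, state, (mem, ret, N) =>
    if 0 < N then
      match fuel with
      | 0 => ret
      | f + 1 =>
        if state == 0 then
          pvLoopA f 1 ((PySem.List.pyRange 0 26 1).foldl pvStepA (mem, ret, N))
        else
          pvLoopA f 0 ((PySem.List.pyRange 25 (-1) (-1)).foldl pvStepA (mem, ret, N))
    else ret

def sortString (s : String) : String :=
  match pvCountA s.toList ((PySem.List.pyRange 0 26 1).map (fun _ => (0 : Int))) with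
  | none => ""   -- Python A raises IndexError here; excluded by Pre_sortString
  | some mem => String.ofList (pvLoopA s.toList.length 0 (mem, [], PySem.Str.len s))

-- ===== PORT B =====
-- loop body: k = occ.get(ch, 0); occ[ch] = k + 1; pairs.append((k, ch))
def pvDecorStep (st : PySem.Dict Char Int × List (Int × Char)) (c : Char) :
    PySem.Dict Char Int × List (Int × Char) :=
  let k := st.1.getD c 0
  (st.1.insert c (k + 1), st.2 ++ [(k, c)])

-- the sort key: p[0] * 256 + (ord(p[1]) if p[0] % 2 == 0 else 255 - ord(p[1]))
def pvKeyB (p : Int × Char) : Int :=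
  p.1 * 256 + (if PySem.Int.mod p.1 2 == 0 then ((p.2.toNat : Nat) : Int) else 255 - ((p.2.toNat : Nat) : Int))

def sortString_alt (s : String) : String :=
  let pairs := (s.toList.foldl pvDecorStep (PySem.Dict.empty, [])).2
  String.ofList ((PySem.List.sorted pairs pvKeyB false).map Prod.snd)

-- ===== PRECONDITION & SPEC =====
-- Pre_ excludes exactly the inputs on which Python A raises IndexError (returning no value):
-- a character whose code is outside 71..122 makes the index ord(ch) - 97 fall outside [-26, 25].
def pvPreChar (c : Char) : Bool := 71 ≤ c.toNat && c.toNat ≤ 122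
def Pre_sortString (s : String) : Prop := (s.toList.all pvPreChar) = true
instance (s : String) : Decidable (Pre_sortString s) := by unfold Pre_sortString; infer_instance
def pvWitness_sortString : String := "leetcode"

-- On strings containing a character with code 71 to 96 (most uppercase letters), A's negative-index
-- wraparound silently counts it into the slot of an unrelated lowercase letter and returns that
-- lowercase letter in its place, while B keeps the character itself, the intended grouping.
def D_sortString (s : String) : Prop := (s.toList.any (fun c => decide (c.toNat < 97))) = true
instance (s : String) : Decidable (D_sortString s) := by unfold D_sortString; infer_instance

def Spec_sortString (s : String) (out : String) : Prop := ¬ D_sortString s → out = sortString_alt s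
instance (s : String) (out : String) : Decidable (Spec_sortString s out) := by unfold Spec_sortString; infer_instance

def pvDiffWitness_sortString : String := "Z"
def pvDiffWitnessOut_sortString : String × String := ("t", "Z")

-- ===== CLAIM (what is proved, stated in full; the proofs are below) =====
def Claim_unchanged_sortString : Prop := ∀ (s : String), Dom_sortString s → Pre_sortString s → Spec_sortString s (sortString s)
def Claim_changed_sortString : Prop := Dom_sortString (pvDiffWitness_sortString) ∧ Pre_sortString (pvDiffWitness_sortString) ∧ D_sortString (pvDiffWitness_sortString) ∧ sortString (pvDiffWitness_sortString) = pvDiffWitnessOut_sortString.1 ∧ sortString_alt (pvDiffWitness_sortString) = pvDiffWitnessOut_sortString.2 ∧ pvDiffWitnessOut_sortString.1 ≠ pvDiffWitnessOut_sortString.2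
def Claim_exact_sortString : Prop := ∀ (s : String), Dom_sortString s → Pre_sortString s → D_sortString s → sortString s ≠ sortString_alt s

-- ===== LEMMAS AND PROOFS =====

-- ---------- A-side: the while-loop equals the round decomposition ----------

def pvDec (m : List Int) : List Int := m.map (fun x => if 0 < x then x - 1 else x)

def pvEmit (cnt : List Int) (r : Int) : List Char :=
  (PySem.List.pyRange 0 26 1).filterMap (fun i =>
    if r < PySem.List.pyGetD cnt i 0 then some (Char.ofNat (i.toNat + 97)) else none)

def pvM (cnt : List Int) : Int := (PySem.List.max? cnt (fun x => x)).getD 0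

def pvRounds (cnt : List Int) (q : Int) : List Char :=
  ((PySem.List.pyRange 0 (pvM cnt) 1).map (fun r =>
    if PySem.Int.mod (r + q) 2 == 1 then (pvEmit cnt r).reverse else pvEmit cnt r)).flatten

def pvDecOn (I : List Int) (mem : List Int) : List Int :=
  I.foldl (fun m i =>
    if 0 < PySem.List.pyGetD m i 0 then PySem.List.pySetD m i (PySem.List.pyGetD m i 0 - 1) else m) mem

lemma pvSum_set : ∀ (m : List Int) (k : Nat) (v : Int) (hk : k < m.length),
    (m.set k v).sum = m.sum + v - m[k]
  | a :: t, 0, v, hk => by simp; ring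
  | a :: t, k+1, v, hk => by
      simp only [List.set_cons_succ, List.sum_cons, List.getElem_cons_succ]
      have := pvSum_set t k v (by simpa using hk)
      omega

lemma pvIdx_lt {n : Nat} {i : Int} {k : Nat} (h : PySem.List.pyIdx? n i = some k) : k < n := by
  unfold PySem.List.pyIdx? at h
  split_ifs at h <;> (injection h with h' ; omega)

lemma pvSet_incr {m m1 : List Int} {i : Int}
    (h : PySem.List.pySet? m i (PySem.List.pyGetD m i 0 + 1) = some m1) :
    m1.length = m.length ∧ m1.sum = m.sum + 1 ∧ ((∀ x ∈ m, 0 ≤ x) → ∀ x ∈ m1, 0 ≤ x) := by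
  unfold PySem.List.pySet? at h
  obtain ⟨k, hidx, rfl⟩ := Option.map_eq_some_iff.mp h
  have hk : k < m.length := pvIdx_lt hidx
  have hget : PySem.List.pyGetD m i 0 = m[k] := by
    simp [PySem.List.pyGetD, PySem.List.pyGet?, hidx, List.getElem?_eq_getElem hk]
  refine ⟨by simp, ?_, ?_⟩
  · rw [hget, pvSum_set m k _ hk]; ring
  · intro hm x hx
    rcases List.mem_or_eq_of_mem_set hx with hx' | rfl
    · exact hm x hx'
    · have := hm m[k] (List.getElem_mem hk); rw [hget]; omega

lemma pvCount_spec : ∀ (cs : List Char) (mem cnt : List Int), pvCountA cs mem = some cnt →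
    cnt.length = mem.length ∧ cnt.sum = mem.sum + cs.length ∧
      ((∀ x ∈ mem, 0 ≤ x) → ∀ x ∈ cnt, 0 ≤ x) := by
  intro cs
  induction cs with
  | nil => intro mem cnt h; simp [pvCountA] at h; subst h; simp
  | cons c t ih =>
    intro mem cnt h
    rw [pvCountA, List.foldlM_cons] at h
    cases hstep : PySem.List.pySet? mem ((c.toNat : Int) - 97)
        (PySem.List.pyGetD mem ((c.toNat : Int) - 97) 0 + 1) with
    | none => rw [hstep] at h; simp at h
    | some m1 =>
      rw [hstep] at h
      have h' : pvCountA t m1 = some cnt := h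
      obtain ⟨hl, hs, hn⟩ := ih m1 cnt h'
      obtain ⟨hl1, hs1, hn1⟩ := pvSet_incr hstep
      refine ⟨by omega, by simp [hs, hs1]; omega, fun hm => hn (hn1 hm)⟩

lemma pvGetD_nn (mem : List Int) (i : Int) (h0 : 0 ≤ i) (h1 : i < (mem.length : Int)) :
    PySem.List.pyGetD mem i 0 = mem[i.toNat]'(by omega) :=
  PySem.List.pyGetD_eq_getElem mem 0 h0 h1

lemma pvSetD_getD_ne (mem : List Int) (i j : Int) (v : Int)
    (hi0 : 0 ≤ i) (hj0 : 0 ≤ j) (hj1 : j < (mem.length : Int))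
    (hne : i ≠ j) :
    PySem.List.pyGetD (PySem.List.pySetD mem i v) j 0 = PySem.List.pyGetD mem j 0 := by
  rw [PySem.List.pySetD_of_nonneg mem v hi0]
  have hlen : (mem.set i.toNat v).length = mem.length := by simp
  have hj1' : j < ((mem.set i.toNat v).length : Int) := by rw [hlen]; exact hj1
  rw [pvGetD_nn (mem.set i.toNat v) j hj0 hj1', pvGetD_nn mem j hj0 hj1]
  have hnat : i.toNat ≠ j.toNat := by omega
  exact List.getElem_set_ne hnat _

lemma pvPass_spec : ∀ (I : List Int) (mem : List Int) (ret : List Char) (N : Int),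
    I.Nodup → (∀ i ∈ I, 0 ≤ i ∧ i < (mem.length : Int)) →
    I.foldl pvStepA (mem, ret, N) =
      (pvDecOn I mem,
       ret ++ I.filterMap (fun i =>
         if 0 < PySem.List.pyGetD mem i 0 then some (Char.ofNat (i.toNat + 97)) else none),
       N - I.countP (fun i => decide (0 < PySem.List.pyGetD mem i 0))) := by
  intro I
  induction I with
  | nil => intro mem ret N _ _; simp [pvDecOn]
  | cons i t ih =>
    intro mem ret N hnd hbnd
    have hi := hbnd i (by simp)
    have hlen : ∀ v, (PySem.List.pySetD mem i v).length = mem.length := by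
      intro v; rw [PySem.List.pySetD_of_nonneg mem v hi.1]; simp
    have hnd' : t.Nodup := (List.nodup_cons.mp hnd).2
    have hni : i ∉ t := (List.nodup_cons.mp hnd).1
    by_cases hpos : 0 < PySem.List.pyGetD mem i 0
    · have hstep : pvStepA (mem, ret, N) i =
        (PySem.List.pySetD mem i (PySem.List.pyGetD mem i 0 - 1),
         ret ++ [Char.ofNat (i.toNat + 97)], N - 1) := by
        simp [pvStepA, hpos]
      set mem' := PySem.List.pySetD mem i (PySem.List.pyGetD mem i 0 - 1) with hmem'
      have hsame : ∀ j ∈ t, PySem.List.pyGetD mem' j 0 = PySem.List.pyGetD mem j 0 := by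
        intro j hj
        have hjb := hbnd j (by simp [hj])
        exact pvSetD_getD_ne mem i j _ hi.1 hjb.1 hjb.2 (fun h => hni (h ▸ hj))
      have hbnd' : ∀ j ∈ t, 0 ≤ j ∧ j < ((mem'.length : Nat) : Int) := by
        intro j hj; rw [hmem', hlen]; exact hbnd j (by simp [hj])
      rw [List.foldl_cons, hstep, ih mem' (ret ++ [Char.ofNat (i.toNat + 97)]) (N - 1) hnd' hbnd']
      refine congrArg₂ _ ?_ (congrArg₂ _ ?_ ?_)
      · simp only [pvDecOn, List.foldl_cons, hpos]
        rfl
      · rw [List.filterMap_cons]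
        simp only [hpos, if_pos, List.append_assoc, List.singleton_append]
        exact congrArg _ (congrArg _ (List.filterMap_congr (fun j hj => by rw [hsame j hj])))
      · rw [List.countP_cons]
        have : t.countP (fun j => decide (0 < PySem.List.pyGetD mem' j 0)) =
               t.countP (fun j => decide (0 < PySem.List.pyGetD mem j 0)) :=
          List.countP_congr (fun j hj => by rw [hsame j hj])
        simp [this, hpos]; ring
    · have hstep : pvStepA (mem, ret, N) i = (mem, ret, N) := by simp [pvStepA, hpos]
      rw [List.foldl_cons, hstep, ih mem ret N hnd' (fun j hj => hbnd j (by simp [hj]))]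
      refine congrArg₂ _ ?_ (congrArg₂ _ ?_ ?_)
      · simp only [pvDecOn, List.foldl_cons, hpos]
        rfl
      · rw [List.filterMap_cons]; simp [hpos]
      · rw [List.countP_cons]; simp [hpos]

lemma pvDecOn_getElem : ∀ (I : List Int) (mem : List Int), I.Nodup →
    (∀ i ∈ I, 0 ≤ i ∧ i < (mem.length : Int)) →
    (pvDecOn I mem).length = mem.length ∧
    ∀ (j : Nat) (hj : j < mem.length) (hj' : j < (pvDecOn I mem).length),
      (pvDecOn I mem)[j] =
        if (j : Int) ∈ I then (if 0 < mem[j] then mem[j] - 1 else mem[j]) else mem[j] := by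
  intro I
  induction I with
  | nil => intro mem _ _; simp [pvDecOn]
  | cons i t ih =>
    intro mem hnd hbnd
    have hi := hbnd i (by simp)
    have hnd' : t.Nodup := (List.nodup_cons.mp hnd).2
    have hni : i ∉ t := (List.nodup_cons.mp hnd).1
    by_cases hpos : 0 < PySem.List.pyGetD mem i 0
    · have hstep : pvDecOn (i :: t) mem =
          pvDecOn t (mem.set i.toNat (PySem.List.pyGetD mem i 0 - 1)) := by
        simp only [pvDecOn, List.foldl_cons, hpos, if_pos,
          PySem.List.pySetD_of_nonneg mem _ hi.1]
      set mem' := mem.set i.toNat (PySem.List.pyGetD mem i 0 - 1) with hm'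
      have hlen' : mem'.length = mem.length := by simp [hm']
      have hbnd' : ∀ j ∈ t, 0 ≤ j ∧ j < (mem'.length : Int) := by
        intro j hj; rw [hlen']; exact hbnd j (by simp [hj])
      obtain ⟨ihl, ihg⟩ := ih mem' hnd' hbnd'
      refine ⟨by rw [hstep, ihl, hlen'], ?_⟩
      intro j hj hj'
      rw [hstep] at hj'
      simp only [hstep]
      rw [ihg j (by omega) hj']
      have hgi : PySem.List.pyGetD mem i 0 = mem[i.toNat]'(by omega) := pvGetD_nn mem i hi.1 hi.2
      by_cases hji : (j : Int) = i
      · have hjnat : j = i.toNat := by omega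
        have hnt : (↑j : Int) ∉ t := by rw [hji]; exact hni
        have hset : mem'[j]'(by omega) = mem[j] - 1 := by
          rw [List.getElem_set]
          have hmij : mem[i.toNat]'(by omega) = mem[j] := by congr 1; omega
          rw [if_pos hjnat.symm, hgi, hmij]
        have hmj : 0 < mem[j] := by
          rw [hgi] at hpos
          have : mem[j] = mem[i.toNat]'(by omega) := by congr 1
          omega
        simp [hji, hni, hset, hmj, List.mem_cons]
      · have hne : i.toNat ≠ j := by omega
        have hset : mem'[j]'(by omega) = mem[j] := List.getElem_set_ne hne _
        simp only [hset]
        simp [List.mem_cons, hji]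
    · have hzi : ¬ 0 < mem[i.toNat]'(by omega) := by
        rw [← pvGetD_nn mem i hi.1 hi.2]; exact hpos
      have hstep : pvDecOn (i :: t) mem = pvDecOn t mem := by
        simp only [pvDecOn, List.foldl_cons, hpos, if_false]
      obtain ⟨ihl, ihg⟩ := ih mem hnd' (fun j hj => hbnd j (by simp [hj]))
      refine ⟨by rw [hstep, ihl], ?_⟩
      intro j hj hj'
      rw [hstep] at hj'
      simp only [hstep]
      rw [ihg j hj hj']
      by_cases hji : (j : Int) = i
      · have hjnat : j = i.toNat := by omega
        have hmj : ¬ 0 < mem[j] := by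
          have : mem[j] = mem[i.toNat]'(by omega) := by congr 1
          omega
        simp [hji, hmj, List.mem_cons]
      · simp [List.mem_cons, hji]

lemma pvDecOn_full (I : List Int) (mem : List Int) (hI : I.Nodup)
    (hmem : ∀ i ∈ I, 0 ≤ i ∧ i < (mem.length : Int))
    (hcov : ∀ j : Nat, j < mem.length → (j : Int) ∈ I) :
    pvDecOn I mem = pvDec mem := by
  obtain ⟨hl, hg⟩ := pvDecOn_getElem I mem hI hmem
  apply List.ext_getElem (by simp [pvDec, hl])
  intro j h1 h2
  rw [hg j (by omega) h1]
  have hj : j < mem.length := by omega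
  simp [pvDec, hcov j hj, List.getElem_map]

lemma pvDec_sum (m : List Int) :
    (pvDec m).sum = m.sum - (m.countP (fun x => decide (0 < x)) : Int) := by
  induction m with
  | nil => simp [pvDec]
  | cons a t ih =>
    simp only [pvDec, List.map_cons, List.sum_cons, List.countP_cons] at *
    by_cases h : 0 < a <;> simp [h, ih] <;> omega

lemma pvDec_nonneg (m : List Int) (h : ∀ x ∈ m, 0 ≤ x) : ∀ x ∈ pvDec m, 0 ≤ x := by
  intro x hx
  obtain ⟨y, hy, rfl⟩ := List.mem_map.mp hx
  have := h y hy
  split <;> omega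

lemma pvDec_length (m : List Int) : (pvDec m).length = m.length := by simp [pvDec]

lemma pvEmit_dec (cnt : List Int) (r : Int) (h26 : cnt.length = 26)
    (hnn : ∀ x ∈ cnt, 0 ≤ x) (hr : 0 ≤ r) :
    pvEmit (pvDec cnt) r = pvEmit cnt (r + 1) := by
  unfold pvEmit
  apply List.filterMap_congr
  intro i hi
  have hib := PySem.List.mem_pyRange_one.mp hi
  have hlt : i < (cnt.length : Int) := by omega
  have hlt' : i < ((pvDec cnt).length : Int) := by rw [pvDec_length]; omega
  rw [pvGetD_nn cnt i hib.1 hlt, pvGetD_nn (pvDec cnt) i hib.1 hlt']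
  have hnx := hnn (cnt[i.toNat]'(by omega)) (List.getElem_mem _)
  have : (pvDec cnt)[i.toNat]'(by omega) =
      if 0 < cnt[i.toNat]'(by omega) then cnt[i.toNat]'(by omega) - 1 else cnt[i.toNat]'(by omega) := by
    simp [pvDec, List.getElem_map]
  rw [this]
  by_cases h : 0 < cnt[i.toNat]'(by omega) <;> simp [h] <;> [skip; skip] <;> try omega
  · by_cases h2 : r < cnt[i.toNat]'(by omega) - 1 <;> by_cases h3 : r + 1 < cnt[i.toNat]'(by omega) <;> simp [h2, h3] <;> omega
  · by_cases h2 : r < cnt[i.toNat]'(by omega) <;> by_cases h3 : r + 1 < cnt[i.toNat]'(by omega) <;> simp [h2, h3] <;> omega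

lemma pvM_spec (cnt : List Int) (hne : cnt ≠ []) :
    pvM cnt ∈ cnt ∧ ∀ x ∈ cnt, x ≤ pvM cnt := by
  cases hmax : PySem.List.max? cnt (fun x => x) with
  | none => exact absurd ((PySem.List.max?_eq_none_iff cnt _).mp hmax) hne
  | some m =>
    have h1 := PySem.List.max?_mem hmax
    have h2 := PySem.List.max?_isMax hmax
    simp only [pvM, hmax, Option.getD_some]
    exact ⟨h1, h2⟩

lemma pvM_nonneg (cnt : List Int) (hne : cnt ≠ []) (hnn : ∀ x ∈ cnt, 0 ≤ x) : 0 ≤ pvM cnt := by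
  obtain ⟨h1, _⟩ := pvM_spec cnt hne
  exact hnn _ h1

lemma pvM_dec (cnt : List Int) (hne : cnt ≠ []) (hnn : ∀ x ∈ cnt, 0 ≤ x) (hM : 0 < pvM cnt) :
    pvM (pvDec cnt) = pvM cnt - 1 := by
  have hne' : pvDec cnt ≠ [] := by
    intro h; apply hne; cases cnt <;> simp_all [pvDec]
  obtain ⟨hm1, hm2⟩ := pvM_spec cnt hne
  obtain ⟨hd1, hd2⟩ := pvM_spec (pvDec cnt) hne'
  have hmem : pvM cnt - 1 ∈ pvDec cnt := by
    apply List.mem_map.mpr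
    exact ⟨pvM cnt, hm1, by simp [hM]⟩
  have hub : ∀ y ∈ pvDec cnt, y ≤ pvM cnt - 1 := by
    intro y hy
    obtain ⟨x, hx, rfl⟩ := List.mem_map.mp hy
    have := hm2 x hx
    have := hnn x hx
    split <;> omega
  have h1 := hd2 _ hmem
  have h2 := hub _ hd1
  omega

lemma pvSum_eq_zero (cnt : List Int) (hz : ∀ x ∈ cnt, x = 0) : cnt.sum = 0 := by
  induction cnt with
  | nil => simp
  | cons a t ih => simp_all

lemma pvM_pos_of_sum_pos (cnt : List Int) (hnn : ∀ x ∈ cnt, 0 ≤ x) (hs : 0 < cnt.sum) :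
    0 < pvM cnt := by
  have hne : cnt ≠ [] := by intro h; subst h; simp at hs
  obtain ⟨_, hm2⟩ := pvM_spec cnt hne
  by_contra h
  push Not at h
  have hle : ∀ x ∈ cnt, x ≤ 0 := fun x hx => le_trans (hm2 x hx) h
  have hz : ∀ x ∈ cnt, x = 0 := fun x hx => le_antisymm (hle x hx) (hnn x hx)
  have := pvSum_eq_zero cnt hz
  omega

lemma pvSum_zero_of_M_nonpos (cnt : List Int) (hnn : ∀ x ∈ cnt, 0 ≤ x) (hM : pvM cnt ≤ 0) :
    cnt.sum = 0 := by
  by_contra h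
  have h0 : 0 ≤ cnt.sum := List.sum_nonneg hnn
  have := pvM_pos_of_sum_pos cnt hnn (by omega)
  omega

lemma pvM_le_sum (cnt : List Int) (hne : cnt ≠ []) (hnn : ∀ x ∈ cnt, 0 ≤ x) :
    pvM cnt ≤ cnt.sum := by
  obtain ⟨hm1, _⟩ := pvM_spec cnt hne
  exact List.single_le_sum hnn _ hm1

lemma pvRounds_nil (cnt : List Int) (q : Int) (hM : pvM cnt ≤ 0) : pvRounds cnt q = [] := by
  unfold pvRounds
  rw [PySem.List.pyRange_one_eq_nil hM]
  simp

lemma pvRounds_step (cnt : List Int) (q : Int) (h26 : cnt.length = 26)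
    (hnn : ∀ x ∈ cnt, 0 ≤ x) (hM : 0 < pvM cnt) :
    pvRounds cnt q =
      (if PySem.Int.mod q 2 == 1 then (pvEmit cnt 0).reverse else pvEmit cnt 0) ++
        pvRounds (pvDec cnt) (q + 1) := by
  have hne : cnt ≠ [] := by intro h; subst h; simp at h26
  have hMd : pvM (pvDec cnt) = pvM cnt - 1 := pvM_dec cnt hne hnn hM
  unfold pvRounds
  rw [hMd, PySem.List.pyRange_one_cons hM]
  rw [List.map_cons, List.flatten_cons]
  congr 1
  · norm_num
  · simp only [zero_add]
    rw [PySem.List.pyRange_one 1 (pvM cnt), PySem.List.pyRange_one 0 (pvM cnt - 1)]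
    have harg : (pvM cnt - 1 - 0).toNat = (pvM cnt - 1).toNat := by norm_num
    rw [harg]
    rw [List.map_map, List.map_map]
    apply congrArg
    apply List.map_congr_left
    intro k hk
    simp only [Function.comp_apply]
    have hk0 : (0 : Int) ≤ (k : Int) := by positivity
    have hemit : pvEmit (pvDec cnt) (0 + (k : Int)) = pvEmit cnt (1 + (k : Int)) := by
      rw [zero_add]
      have := pvEmit_dec cnt (k : Int) h26 hnn hk0
      rw [this]; congr 1; ring
    have hmod : PySem.Int.mod ((1 : Int) + k + q) 2 = PySem.Int.mod ((0 : Int) + k + (q + 1)) 2 := by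
      congr 1; ring
    rw [hemit, hmod]

lemma pvAscRange_bounds (mem : List Int) (h26 : mem.length = 26) :
    ∀ i ∈ PySem.List.pyRange 0 26 1, 0 ≤ i ∧ i < (mem.length : Int) := by
  intro i hi
  have := PySem.List.mem_pyRange_one.mp hi
  constructor
  · exact this.1
  · rw [h26]; exact_mod_cast this.2

lemma pvCount_asc (mem : List Int) (h26 : mem.length = 26) :
    ((PySem.List.pyRange 0 26 1).countP (fun i => decide (0 < PySem.List.pyGetD mem i 0))) =
      mem.countP (fun x => decide (0 < x)) := by
  have h := PySem.List.map_pyGetD_pyRange_zero (xs := mem) (d := (0 : Int))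
  conv_rhs => rw [← h]
  rw [List.countP_map]
  have hlen : PySem.List.len mem = (26 : Int) := by
    rw [PySem.List.len_eq, h26]; norm_num
  rw [hlen]
  rfl

lemma pvDesc_eq_reverse : PySem.List.pyRange 25 (-1) (-1) = (PySem.List.pyRange 0 26 1).reverse := by
  have := PySem.List.pyRange_neg_one_eq_reverse 25 (-1); simpa using this

lemma pvAsc_pass (mem : List Int) (ret : List Char) (N : Int) (h26 : mem.length = 26) :
    (PySem.List.pyRange 0 26 1).foldl pvStepA (mem, ret, N) =
      (pvDec mem, ret ++ pvEmit mem 0, N - mem.countP (fun x => decide (0 < x))) := by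
  rw [pvPass_spec _ mem ret N (PySem.List.nodup_pyRange_one 0 26) (pvAscRange_bounds mem h26)]
  rw [pvCount_asc mem h26]
  rw [pvDecOn_full _ mem (PySem.List.nodup_pyRange_one 0 26) (pvAscRange_bounds mem h26)
    (fun j hj => PySem.List.mem_pyRange_one.mpr ⟨by positivity, by rw [h26] at hj; exact_mod_cast hj⟩)]
  rfl

lemma pvDesc_pass (mem : List Int) (ret : List Char) (N : Int) (h26 : mem.length = 26) :
    (PySem.List.pyRange 25 (-1) (-1)).foldl pvStepA (mem, ret, N) =
      (pvDec mem, ret ++ (pvEmit mem 0).reverse, N - mem.countP (fun x => decide (0 < x))) := by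
  rw [pvDesc_eq_reverse]
  have hnd : ((PySem.List.pyRange 0 26 1).reverse).Nodup := by
    rw [List.nodup_reverse]; exact PySem.List.nodup_pyRange_one 0 26
  have hbnd : ∀ i ∈ (PySem.List.pyRange 0 26 1).reverse, 0 ≤ i ∧ i < (mem.length : Int) := by
    intro i hi; exact pvAscRange_bounds mem h26 i (List.mem_reverse.mp hi)
  rw [pvPass_spec _ mem ret N hnd hbnd]
  rw [List.countP_reverse, pvCount_asc mem h26]
  rw [pvDecOn_full _ mem hnd hbnd
    (fun j hj => List.mem_reverse.mpr (PySem.List.mem_pyRange_one.mpr ⟨by positivity, by rw [h26] at hj; exact_mod_cast hj⟩))]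
  rw [List.filterMap_reverse]
  rfl

lemma pvLoop_eq : ∀ (fuel : Nat) (cnt : List Int) (ret : List Char) (N q : Int),
    cnt.length = 26 → (∀ x ∈ cnt, 0 ≤ x) → N = cnt.sum → (pvM cnt).toNat ≤ fuel →
    pvLoopA fuel (PySem.Int.mod q 2) (cnt, ret, N) = ret ++ pvRounds cnt q := by
  intro fuel
  induction fuel with
  | zero =>
    intro cnt ret N q h26 hnn hNs hfuel
    have hne : cnt ≠ [] := by intro h; subst h; simp at h26
    have hM0 : 0 ≤ pvM cnt := pvM_nonneg cnt hne hnn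
    have hM : pvM cnt ≤ 0 := by omega
    have hsum : cnt.sum = 0 := pvSum_zero_of_M_nonpos cnt hnn hM
    rw [pvLoopA, pvRounds_nil cnt q hM]
    simp [hNs, hsum]
  | succ f ih =>
    intro cnt ret N q h26 hnn hNs hfuel
    have hne : cnt ≠ [] := by intro h; subst h; simp at h26
    have hM0 : 0 ≤ pvM cnt := pvM_nonneg cnt hne hnn
    by_cases hN : 0 < N
    · have hM : 0 < pvM cnt := pvM_pos_of_sum_pos cnt hnn (by omega)
      have hmod2 : PySem.Int.mod q 2 = q % 2 := PySem.Int.mod_eq_emod_of_pos (by norm_num)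
      have hIH26 : (pvDec cnt).length = 26 := by rw [pvDec_length, h26]
      have hIHnn := pvDec_nonneg cnt hnn
      have hIHsum : N - cnt.countP (fun x => decide (0 < x)) = (pvDec cnt).sum := by
        rw [pvDec_sum]; omega
      have hIHfuel : (pvM (pvDec cnt)).toNat ≤ f := by
        rw [pvM_dec cnt hne hnn hM]; omega
      by_cases hpar : q % 2 = 0
      · have h0 : PySem.Int.mod q 2 = 0 := by rw [hmod2, hpar]
        rw [pvLoopA, if_pos hN, h0]
        simp only [BEq.rfl, if_pos]
        rw [pvAsc_pass cnt ret N h26]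
        have h1 : PySem.Int.mod (q + 1) 2 = 1 := by
          rw [PySem.Int.mod_eq_emod_of_pos (by norm_num)]; omega
        have ihx := ih (pvDec cnt) (ret ++ pvEmit cnt 0) _ (q + 1) hIH26 hIHnn hIHsum hIHfuel
        rw [h1] at ihx
        rw [ihx]
        rw [pvRounds_step cnt q h26 hnn hM]
        have : (PySem.Int.mod q 2 == 1) = false := by rw [h0]; rfl
        rw [this]
        simp [List.append_assoc]
      · have h1 : PySem.Int.mod q 2 = 1 := by rw [hmod2]; omega
        rw [pvLoopA, if_pos hN, h1]
        have hbeq : ((1 : Int) == 0) = false := by rfl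
        rw [hbeq]
        simp only [Bool.false_eq_true, if_false]
        rw [pvDesc_pass cnt ret N h26]
        have h0' : PySem.Int.mod (q + 1) 2 = 0 := by
          rw [PySem.Int.mod_eq_emod_of_pos (by norm_num)]; omega
        have ihx := ih (pvDec cnt) (ret ++ (pvEmit cnt 0).reverse) _ (q + 1) hIH26 hIHnn hIHsum hIHfuel
        rw [h0'] at ihx
        rw [ihx]
        rw [pvRounds_step cnt q h26 hnn hM]
        have : (PySem.Int.mod q 2 == 1) = true := by rw [h1]; rfl
        rw [this]
        simp [List.append_assoc]
    · have hsum0 : cnt.sum = 0 := by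
        have := List.sum_nonneg hnn
        omega
      have hM : pvM cnt ≤ 0 := by
        by_contra h
        have := pvM_le_sum cnt hne hnn
        omega
      rw [pvLoopA, if_neg hN, pvRounds_nil cnt q hM, List.append_nil]

-- A under Pre_: the result is the round decomposition of the computed count array
lemma pvA_rounds (s : String) (cnt : List Int)
    (hcnt : pvCountA s.toList ((PySem.List.pyRange 0 26 1).map (fun _ => (0 : Int))) = some cnt) :
    sortString s = String.ofList (pvRounds cnt 0) := by
  obtain ⟨hl, hs, hn⟩ := pvCount_spec _ _ _ hcnt
  have h26 : cnt.length = 26 := by rw [hl]; decide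
  have hnn : ∀ x ∈ cnt, 0 ≤ x := hn (by decide)
  have hzero : ((PySem.List.pyRange 0 26 1).map (fun _ => (0 : Int))).sum = 0 := by decide
  have hsum : cnt.sum = (s.toList.length : Int) := by rw [hs, hzero]; ring
  have hne : cnt ≠ [] := by intro h; subst h; simp at h26
  have hfuel : (pvM cnt).toNat ≤ s.toList.length := by
    have := pvM_le_sum cnt hne hnn
    omega
  have hloop := pvLoop_eq s.toList.length cnt [] (PySem.Str.len s) 0 h26 hnn
    (by rw [PySem.Str.len_eq, hsum]) hfuel
  have hmod0 : PySem.Int.mod 0 2 = 0 := by decide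
  rw [hmod0] at hloop
  simp only [sortString, hcnt]
  rw [hloop, List.nil_append]

-- ---------- B-side: the decorated sort ----------

-- counts per slot, under all-lowercase input
lemma pvSet_lower {m : List Int} {i : Int} (h0 : 0 ≤ i) (h1 : i < (m.length : Int)) (v : Int) :
    PySem.List.pySet? m i v = some (m.set i.toNat v) := by
  unfold PySem.List.pySet? PySem.List.pyIdx?
  have : (0 : Int) ≤ i ∧ i < (m.length : Int) := ⟨h0, h1⟩
  simp [h0, h1]

lemma pvGetD_set_self (mem : List Int) (i : Int) (v : Int)
    (h0 : 0 ≤ i) (h1 : i < (mem.length : Int)) :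
    PySem.List.pyGetD (mem.set i.toNat v) i 0 = v := by
  have hlen : ((mem.set i.toNat v).length : Int) = (mem.length : Int) := by simp
  rw [pvGetD_nn (mem.set i.toNat v) i h0 (by rw [hlen]; exact h1)]
  exact List.getElem_set_self _

lemma pvGetD_set_ne (mem : List Int) (i j v : Int)
    (hi0 : 0 ≤ i) (hj0 : 0 ≤ j) (hj1 : j < (mem.length : Int)) (hne : i ≠ j) :
    PySem.List.pyGetD (mem.set i.toNat v) j 0 = PySem.List.pyGetD mem j 0 := by
  rw [← PySem.List.pySetD_of_nonneg mem v hi0]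
  exact pvSetD_getD_ne mem i j v hi0 hj0 hj1 hne

lemma pvCount_lower : ∀ (cs : List Char) (mem : List Int), mem.length = 26 →
    (∀ c ∈ cs, 97 ≤ c.toNat ∧ c.toNat ≤ 122) →
    ∃ cnt, pvCountA cs mem = some cnt ∧
      ∀ j : Int, 0 ≤ j → j < 26 →
        PySem.List.pyGetD cnt j 0 =
          PySem.List.pyGetD mem j 0 + (cs.countP (fun c => ((c.toNat : Int) - 97) == j) : Int) := by
  intro cs
  induction cs with
  | nil =>
    intro mem h26 _
    exact ⟨mem, by simp [pvCountA], fun j _ _ => by simp⟩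
  | cons c t ih =>
    intro mem h26 hlow
    have hc := hlow c (by simp)
    have hi0 : (0 : Int) ≤ (c.toNat : Int) - 97 := by omega
    have hi1 : (c.toNat : Int) - 97 < (mem.length : Int) := by rw [h26]; omega
    obtain ⟨cnt, hcnt, hval⟩ := ih
      (mem.set ((c.toNat : Int) - 97).toNat (PySem.List.pyGetD mem ((c.toNat : Int) - 97) 0 + 1))
      (by simp [h26]) (fun x hx => hlow x (by simp [hx]))
    refine ⟨cnt, ?_, ?_⟩
    · rw [pvCountA, List.foldlM_cons, pvSet_lower hi0 hi1]
      exact hcnt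
    · intro j hj0 hj1
      rw [hval j hj0 hj1, List.countP_cons]
      by_cases hij : ((c.toNat : Int) - 97) = j
      · subst hij
        rw [pvGetD_set_self mem _ _ hi0 hi1]
        simp only [BEq.rfl, if_pos]
        push_cast
        ring
      · rw [pvGetD_set_ne mem _ j _ hi0 hj0 (by rw [h26]; exact hj1) hij]
        have hne : (((c.toNat : Int) - 97) == j) = false := by
          simpa using hij
        rw [hne]
        push_cast
        ring

-- the decoration the fold builds, as a pure recursion over the string
def pvDecor : List Char → (Char → Int) → List (Int × Char)
  | [], _ => []
  | c :: t, C => (C c, c) :: pvDecor t (fun x => if x = c then C c + 1 else C x)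

lemma pvFold_decor : ∀ (cs : List Char) (occ : PySem.Dict Char Int) (acc : List (Int × Char))
    (C : Char → Int), (∀ ch, occ.getD ch 0 = C ch) →
    (cs.foldl pvDecorStep (occ, acc)).2 = acc ++ pvDecor cs C := by
  intro cs
  induction cs with
  | nil => intro occ acc C _; simp [pvDecor]
  | cons c t ih =>
    intro occ acc C hC
    have hC' : ∀ ch, (occ.insert c (C c + 1)).getD ch 0 =
        (fun x => if x = c then C c + 1 else C x) ch := by
      intro ch
      rw [PySem.Dict.getD_insert]
      by_cases h : ch = c <;> simp [h, hC]
    rw [List.foldl_cons]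
    show ((t.foldl pvDecorStep (occ.insert c (occ.getD c 0 + 1), acc ++ [(occ.getD c 0, c)]))).2 = _
    rw [hC c, ih _ _ _ hC', pvDecor]
    simp

lemma pvDecor_map_snd : ∀ (cs : List Char) (C : Char → Int), (pvDecor cs C).map Prod.snd = cs := by
  intro cs
  induction cs with
  | nil => intro C; simp [pvDecor]
  | cons c t ih => intro C; simp [pvDecor, ih]

lemma pvChar_eq_of_toNat {a b : Char} (h : a.toNat = b.toNat) : a = b := by
  have hv : a.val = b.val := by
    unfold Char.toNat at h
    exact UInt32.toNat_inj.mp h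
  exact Char.ext hv

lemma pvDecor_mem : ∀ (cs : List Char) (C : Char → Int) (k : Int) (ch : Char),
    ((k, ch) ∈ pvDecor cs C) ↔ (C ch ≤ k ∧ k < C ch + (cs.count ch : Int)) := by
  intro cs
  induction cs with
  | nil => intro C k ch; simp [pvDecor]
  | cons c t ih =>
    intro C k ch
    rcases eq_or_ne ch c with rfl | hch
    · rw [pvDecor, List.mem_cons, ih]
      simp only [Prod.mk.injEq, and_true, List.count_cons_self]
      push_cast
      omega
    · rw [pvDecor, List.mem_cons, ih, List.count_cons_of_ne (Ne.symm hch)]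
      simp only [if_neg hch, Prod.mk.injEq]
      constructor
      · rintro (⟨_, h2⟩ | h)
        · exact absurd h2 hch
        · exact h
      · intro h; exact Or.inr h

lemma pvDecor_nodup : ∀ (cs : List Char) (C : Char → Int), (pvDecor cs C).Nodup := by
  intro cs
  induction cs with
  | nil => intro C; simp [pvDecor]
  | cons c t ih =>
    intro C
    rw [pvDecor, List.nodup_cons]
    refine ⟨?_, ih _⟩
    rw [pvDecor_mem]
    split_ifs with h
    · omega
    · exact absurd rfl h

-- decorated rounds
def pvEmitP (cnt : List Int) (r : Int) : List (Int × Char) :=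
  (PySem.List.pyRange 0 26 1).filterMap (fun i =>
    if r < PySem.List.pyGetD cnt i 0 then some (r, Char.ofNat (i.toNat + 97)) else none)

def pvRoundsP (cnt : List Int) : List (Int × Char) :=
  ((PySem.List.pyRange 0 (pvM cnt) 1).map (fun r =>
    if PySem.Int.mod r 2 == 1 then (pvEmitP cnt r).reverse else pvEmitP cnt r)).flatten

lemma pvEmitP_map_snd (cnt : List Int) (r : Int) :
    (pvEmitP cnt r).map Prod.snd = pvEmit cnt r := by
  unfold pvEmitP pvEmit
  rw [List.map_filterMap]
  apply List.filterMap_congr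
  intro i _
  by_cases h : r < PySem.List.pyGetD cnt i 0 <;> simp [h]

lemma pvRoundsP_map_snd (cnt : List Int) : (pvRoundsP cnt).map Prod.snd = pvRounds cnt 0 := by
  unfold pvRoundsP pvRounds
  rw [List.map_flatten, List.map_map]
  apply congrArg
  apply List.map_congr_left
  intro r _
  simp only [Function.comp_apply, add_zero]
  split_ifs <;> simp [pvEmitP_map_snd]

-- membership/shape of pvEmitP elements
lemma pvEmitP_mem {cnt : List Int} {r : Int} {p : Int × Char} (hp : p ∈ pvEmitP cnt r) :
    p.1 = r ∧ ∃ i ∈ PySem.List.pyRange 0 26 1,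
      p.2 = Char.ofNat (i.toNat + 97) ∧ r < PySem.List.pyGetD cnt i 0 := by
  unfold pvEmitP at hp
  obtain ⟨i, hi, hfi⟩ := List.mem_filterMap.mp hp
  by_cases h : r < PySem.List.pyGetD cnt i 0
  · rw [if_pos h] at hfi
    injection hfi with hfi
    subst hfi
    exact ⟨rfl, i, hi, rfl, h⟩
  · rw [if_neg h] at hfi; cases hfi

lemma pvChr_toNat (i : Int) (hi : i ∈ PySem.List.pyRange 0 26 1) :
    (Char.ofNat (i.toNat + 97)).toNat = i.toNat + 97 := by
  have h : ∀ j ∈ PySem.List.pyRange 0 26 1, (Char.ofNat (j.toNat + 97)).toNat = j.toNat + 97 := by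
    decide
  exact h i hi

-- membership characterisation of pvEmitP
lemma pvEmitP_mem_iff (cnt : List Int) (r k : Int) (ch : Char) :
    ((k, ch) ∈ pvEmitP cnt r) ↔
      (k = r ∧ 97 ≤ ch.toNat ∧ ch.toNat ≤ 122 ∧
        r < PySem.List.pyGetD cnt ((ch.toNat : Int) - 97) 0) := by
  constructor
  · intro hp
    obtain ⟨hfst, i, hi, hsnd, hcond⟩ := pvEmitP_mem hp
    have hib := PySem.List.mem_pyRange_one.mp hi
    have htn : ch.toNat = i.toNat + 97 := by
      have := pvChr_toNat i hi
      rw [show ((k, ch) : Int × Char).2 = ch from rfl] at hsnd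
      rw [hsnd, this]
    refine ⟨hfst, by omega, by omega, ?_⟩
    have hslot : (ch.toNat : Int) - 97 = i := by omega
    rw [hslot]
    exact hcond
  · rintro ⟨rfl, h1, h2, h3⟩
    unfold pvEmitP
    rw [List.mem_filterMap]
    have hmem : ((ch.toNat : Int) - 97) ∈ PySem.List.pyRange 0 26 1 :=
      PySem.List.mem_pyRange_one.mpr ⟨by omega, by omega⟩
    refine ⟨(ch.toNat : Int) - 97, hmem, ?_⟩
    rw [if_pos h3]
    have htn := pvChr_toNat _ hmem
    have hch : Char.ofNat (((ch.toNat : Int) - 97).toNat + 97) = ch := by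
      apply pvChar_eq_of_toNat
      rw [htn]
      omega
    rw [hch]

-- membership characterisation of pvRoundsP
lemma pvRoundsP_mem_iff (cnt : List Int) (k : Int) (ch : Char) :
    ((k, ch) ∈ pvRoundsP cnt) ↔
      (0 ≤ k ∧ k < pvM cnt ∧ 97 ≤ ch.toNat ∧ ch.toNat ≤ 122 ∧
        k < PySem.List.pyGetD cnt ((ch.toNat : Int) - 97) 0) := by
  unfold pvRoundsP
  rw [List.mem_flatten]
  constructor
  · rintro ⟨l, hl, hmem⟩
    obtain ⟨r, hr, rfl⟩ := List.mem_map.mp hl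
    have hrb := PySem.List.mem_pyRange_one.mp hr
    have hmem' : (k, ch) ∈ pvEmitP cnt r := by
      by_cases h : (PySem.Int.mod r 2 == 1) = true
      · rw [if_pos h] at hmem; exact List.mem_reverse.mp hmem
      · rw [if_neg h] at hmem; exact hmem
    obtain ⟨rfl, h1, h2, h3⟩ := (pvEmitP_mem_iff cnt r k ch).mp hmem'
    exact ⟨hrb.1, hrb.2, h1, h2, h3⟩
  · rintro ⟨h0, hM, h1, h2, h3⟩
    refine ⟨(if PySem.Int.mod k 2 == 1 then (pvEmitP cnt k).reverse else pvEmitP cnt k),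
      List.mem_map.mpr ⟨k, PySem.List.mem_pyRange_one.mpr ⟨h0, hM⟩, rfl⟩, ?_⟩
    have hmem : (k, ch) ∈ pvEmitP cnt k := (pvEmitP_mem_iff cnt k k ch).mpr ⟨rfl, h1, h2, h3⟩
    by_cases h : (PySem.Int.mod k 2 == 1) = true
    · rw [if_pos h]; exact List.mem_reverse.mpr hmem
    · rw [if_neg h]; exact hmem

-- strict key order inside one round
lemma pvEmitP_pairwise_key (cnt : List Int) (r : Int) :
    (pvEmitP cnt r).Pairwise (fun a b => a.1 = r ∧ b.1 = r ∧ a.2.toNat < b.2.toNat ∧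
      97 ≤ a.2.toNat ∧ b.2.toNat ≤ 122) := by
  unfold pvEmitP
  rw [List.pairwise_filterMap]
  have hrange : (PySem.List.pyRange 0 26 1).Pairwise (fun a b : Int =>
      a ∈ PySem.List.pyRange 0 26 1 ∧ b ∈ PySem.List.pyRange 0 26 1 ∧ a < b) := by decide
  apply hrange.imp
  rintro i j ⟨hi, hj, hij⟩ x hx y hy
  by_cases ci : r < PySem.List.pyGetD cnt i 0
  · rw [if_pos ci] at hx
    by_cases cj : r < PySem.List.pyGetD cnt j 0
    · rw [if_pos cj] at hy
      injection hx with hx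
      injection hy with hy
      subst hx
      subst hy
      have hbi := PySem.List.mem_pyRange_one.mp hi
      have hbj := PySem.List.mem_pyRange_one.mp hj
      refine ⟨rfl, rfl, ?_, ?_, ?_⟩
      · rw [show ((r, Char.ofNat (i.toNat + 97)) : Int × Char).2 = Char.ofNat (i.toNat + 97) from rfl,
            show ((r, Char.ofNat (j.toNat + 97)) : Int × Char).2 = Char.ofNat (j.toNat + 97) from rfl,
            pvChr_toNat i hi, pvChr_toNat j hj]
        omega
      · rw [show ((r, Char.ofNat (i.toNat + 97)) : Int × Char).2 = Char.ofNat (i.toNat + 97) from rfl,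
            pvChr_toNat i hi]
        omega
      · rw [show ((r, Char.ofNat (j.toNat + 97)) : Int × Char).2 = Char.ofNat (j.toNat + 97) from rfl,
            pvChr_toNat j hj]
        omega
    · rw [if_neg cj] at hy; cases hy
  · rw [if_neg ci] at hx; cases hx

-- one round of the decorated rounds list is strictly increasing under the sort key
lemma pvEmitP_pairwise (cnt : List Int) (r : Int) (hr : 0 ≤ r) :
    (if PySem.Int.mod r 2 == 1 then (pvEmitP cnt r).reverse else pvEmitP cnt r).Pairwise
      (fun a b => pvKeyB a < pvKeyB b) := by
  have hmod2 : PySem.Int.mod r 2 = r % 2 := PySem.Int.mod_eq_emod_of_pos (by norm_num)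
  have hpw := pvEmitP_pairwise_key cnt r
  have hr2 : r % 2 = 0 ∨ r % 2 = 1 := by omega
  by_cases hpar : r % 2 = 1
  · have hb : (PySem.Int.mod r 2 == 1) = true := by rw [hmod2, hpar]; rfl
    rw [if_pos hb, List.pairwise_reverse]
    apply hpw.imp
    rintro a b ⟨ha, hb', hlt, hlo, hhi⟩
    unfold pvKeyB
    rw [ha, hb', hmod2, hpar]
    rw [show ((1 : Int) == 0) = false from rfl]
    simp only [Bool.false_eq_true, if_false]
    omega
  · have h0 : r % 2 = 0 := by omega
    have hb : (PySem.Int.mod r 2 == 1) = false := by rw [hmod2, h0]; rfl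
    rw [hb]
    simp only [Bool.false_eq_true, if_false]
    apply hpw.imp
    rintro a b ⟨ha, hb', hlt, hlo, hhi⟩
    unfold pvKeyB
    rw [ha, hb', hmod2, h0]
    rw [show ((0 : Int) == 0) = true from rfl]
    simp only [if_true]
    omega

lemma pvEmitP_key_range (cnt : List Int) (r : Int) (hr : 0 ≤ r) (p : Int × Char)
    (hp : p ∈ pvEmitP cnt r) :
    256 * r ≤ pvKeyB p ∧ pvKeyB p < 256 * r + 256 := by
  obtain ⟨hfst, i, hi, hsnd, _⟩ := pvEmitP_mem hp
  have hib := PySem.List.mem_pyRange_one.mp hi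
  have htn : p.2.toNat = i.toNat + 97 := by rw [hsnd]; exact pvChr_toNat i hi
  unfold pvKeyB
  rw [hfst, htn]
  by_cases h : (PySem.Int.mod r 2 == 0) = true
  · rw [if_pos h]; omega
  · rw [if_neg h]; omega

lemma pvRoundsP_pairwise (cnt : List Int) :
    (pvRoundsP cnt).Pairwise (fun a b => pvKeyB a < pvKeyB b) := by
  unfold pvRoundsP
  rw [List.pairwise_flatten]
  constructor
  · intro l hl
    obtain ⟨r, hr, rfl⟩ := List.mem_map.mp hl
    exact pvEmitP_pairwise cnt r (PySem.List.mem_pyRange_one.mp hr).1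
  · rw [List.pairwise_map]
    have h1 : (PySem.List.pyRange 0 (pvM cnt) 1).Pairwise (fun a b : Int => a < b) := by
      rw [PySem.List.pyRange_one]
      rw [List.pairwise_map]
      apply List.Pairwise.imp ?_ List.pairwise_lt_range
      intro a b hab
      omega
    have h2 : (PySem.List.pyRange 0 (pvM cnt) 1).Pairwise (fun a b : Int => 0 ≤ a ∧ a < b) :=
      List.Pairwise.imp_of_mem
        (fun ha _ hab => ⟨(PySem.List.mem_pyRange_one.mp ha).1, hab⟩) h1
    apply h2.imp
    rintro r r' ⟨hr0, hlt⟩ x hx y hy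
    have hx' : x ∈ pvEmitP cnt r := by
      by_cases h : (PySem.Int.mod r 2 == 1) = true
      · rw [if_pos h] at hx; exact List.mem_reverse.mp hx
      · rw [if_neg h] at hx; exact hx
    have hy' : y ∈ pvEmitP cnt r' := by
      by_cases h : (PySem.Int.mod r' 2 == 1) = true
      · rw [if_pos h] at hy; exact List.mem_reverse.mp hy
      · rw [if_neg h] at hy; exact hy
    have hk1 := pvEmitP_key_range cnt r hr0 x hx'
    have hk2 := pvEmitP_key_range cnt r' (by omega) y hy'
    omega

lemma pvRoundsP_nodup (cnt : List Int) : (pvRoundsP cnt).Nodup := by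
  apply List.Pairwise.imp ?_ (pvRoundsP_pairwise cnt)
  intro a b hab
  intro h
  rw [h] at hab
  exact lt_irrefl _ hab

-- the permutation: decorated rounds ~ decorated input (all-lowercase input)
lemma pvPerm (cs : List Char) (cnt : List Int)
    (hlow : ∀ c ∈ cs, 97 ≤ c.toNat ∧ c.toNat ≤ 122)
    (h26 : cnt.length = 26)
    (hcnt : ∀ j : Int, 0 ≤ j → j < 26 →
      PySem.List.pyGetD cnt j 0 = (cs.countP (fun c => ((c.toNat : Int) - 97) == j) : Int)) :
    (pvRoundsP cnt).Perm (pvDecor cs (fun _ => 0)) := by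
  rw [List.perm_ext_iff_of_nodup (pvRoundsP_nodup cnt) (pvDecor_nodup cs _)]
  rintro ⟨k, ch⟩
  rw [pvRoundsP_mem_iff, pvDecor_mem]
  by_cases hlower : 97 ≤ ch.toNat ∧ ch.toNat ≤ 122
  · have hslot0 : (0 : Int) ≤ (ch.toNat : Int) - 97 := by omega
    have hslot1 : (ch.toNat : Int) - 97 < 26 := by omega
    have hcp : cs.countP (fun c => ((c.toNat : Int) - 97) == ((ch.toNat : Int) - 97)) =
        cs.count ch := by
      rw [List.count]
      apply List.countP_congr
      intro c _
      by_cases hcc : c = ch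
      · subst hcc; simp
      · have hne : ¬ ((c.toNat : Int) - 97 = (ch.toNat : Int) - 97) := by
          intro h
          exact hcc (pvChar_eq_of_toNat (by omega))
        simp [hne, hcc]
    have hget : PySem.List.pyGetD cnt ((ch.toNat : Int) - 97) 0 = (cs.count ch : Int) := by
      rw [hcnt _ hslot0 hslot1, hcp]
    rw [hget]
    have hle : (cs.count ch : Int) ≤ pvM cnt := by
      have hne : cnt ≠ [] := by intro h; subst h; simp at h26
      obtain ⟨_, hmax⟩ := pvM_spec cnt hne
      have hmem : PySem.List.pyGetD cnt ((ch.toNat : Int) - 97) 0 ∈ cnt := by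
        rw [pvGetD_nn cnt _ hslot0 (by rw [h26]; exact_mod_cast hslot1)]
        exact List.getElem_mem _
      have := hmax _ hmem
      rw [hget] at this
      exact this
    constructor
    · rintro ⟨h0, _, _, _, hk⟩
      exact ⟨h0, by omega⟩
    · rintro ⟨h0, hk⟩
      exact ⟨h0, by omega, hlower.1, hlower.2, by omega⟩
  · have hcnt0 : cs.count ch = 0 := by
      rw [List.count_eq_zero]
      intro hmem
      exact hlower ⟨(hlow ch hmem).1, (hlow ch hmem).2⟩
    rw [hcnt0]
    constructor
    · rintro ⟨_, _, h1, h2, _⟩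
      exact absurd ⟨h1, h2⟩ hlower
    · rintro ⟨h0, hk⟩
      simp at hk
      omega

-- B under all-lowercase input: the sorted decoration is the decorated rounds
lemma pvB_rounds (s : String) (cnt : List Int)
    (hlow : ∀ c ∈ s.toList, 97 ≤ c.toNat ∧ c.toNat ≤ 122)
    (h26 : cnt.length = 26)
    (hcnt : ∀ j : Int, 0 ≤ j → j < 26 →
      PySem.List.pyGetD cnt j 0 = (s.toList.countP (fun c => ((c.toNat : Int) - 97) == j) : Int)) :
    sortString_alt s = String.ofList (pvRounds cnt 0) := by
  unfold sortString_alt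
  have hpairs : (s.toList.foldl pvDecorStep (PySem.Dict.empty, [])).2 =
      pvDecor s.toList (fun _ => 0) := by
    have := pvFold_decor s.toList PySem.Dict.empty [] (fun _ => 0)
      (fun ch => by simp [PySem.Dict.getD_empty])
    simpa using this
  rw [hpairs]
  have hperm := pvPerm s.toList cnt hlow h26 hcnt
  have hsorted := PySem.List.sorted_eq_of_perm_of_pairwise_lt
    (pvDecor s.toList (fun _ => 0)) (pvRoundsP cnt) pvKeyB hperm (pvRoundsP_pairwise cnt)
  show String.ofList ((PySem.List.sorted (pvDecor s.toList fun _ => 0) pvKeyB).map Prod.snd) =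
    String.ofList (pvRounds cnt 0)
  rw [hsorted, pvRoundsP_map_snd]

-- characters of A's output are all lowercase codes
lemma pvRounds_chars (cnt : List Int) (q : Int) :
    ∀ c ∈ pvRounds cnt q, 97 ≤ c.toNat := by
  intro c hc
  unfold pvRounds at hc
  obtain ⟨l, hl, hcl⟩ := List.mem_flatten.mp hc
  obtain ⟨r, _, rfl⟩ := List.mem_map.mp hl
  have hc' : c ∈ pvEmit cnt r := by
    by_cases h : PySem.Int.mod (r + q) 2 == 1
    · rw [if_pos h] at hcl; exact List.mem_reverse.mp hcl
    · rw [if_neg h] at hcl; exact hcl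
  unfold pvEmit at hc'
  obtain ⟨i, hi, hfi⟩ := List.mem_filterMap.mp hc'
  by_cases h : r < PySem.List.pyGetD cnt i 0
  · rw [if_pos h] at hfi
    injection hfi with hfi
    subst hfi
    rw [pvChr_toNat i hi]
    omega
  · rw [if_neg h] at hfi; cases hfi

-- B's output characters are exactly the characters of s (as a multiset; we only need membership)
lemma pvB_mem (s : String) (c : Char) (hc : c ∈ s.toList) : c ∈ (sortString_alt s).toList := by
  unfold sortString_alt
  have hpairs : (s.toList.foldl pvDecorStep (PySem.Dict.empty, [])).2 =
      pvDecor s.toList (fun _ => 0) := by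
    have := pvFold_decor s.toList PySem.Dict.empty [] (fun _ => 0)
      (fun ch => by simp [PySem.Dict.getD_empty])
    simpa using this
  rw [hpairs]
  rw [String.toList_ofList]
  have hmem : c ∈ (pvDecor s.toList (fun _ => 0)).map Prod.snd := by
    rw [pvDecor_map_snd]; exact hc
  obtain ⟨p, hp, rfl⟩ := List.mem_map.mp hmem
  exact List.mem_map_of_mem ((PySem.List.mem_sorted _ _ _ _).mpr hp)

-- Pre_ guarantees pvCountA succeeds (indices lie in [-26, 25])
lemma pvCountA_pre : ∀ (cs : List Char) (mem : List Int), mem.length = 26 →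
    (∀ c ∈ cs, 71 ≤ c.toNat ∧ c.toNat ≤ 122) →
    ∃ cnt, pvCountA cs mem = some cnt := by
  intro cs
  induction cs with
  | nil => intro mem _ _; exact ⟨mem, by simp [pvCountA]⟩
  | cons c t ih =>
    intro mem h26 hpre
    have hc := hpre c (by simp)
    have hsome : ∃ m1, PySem.List.pySet? mem ((c.toNat : Int) - 97)
        (PySem.List.pyGetD mem ((c.toNat : Int) - 97) 0 + 1) = some m1 := by
      unfold PySem.List.pySet?
      cases hidx : PySem.List.pyIdx? mem.length ((c.toNat : Int) - 97) with
      | some k =>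
        exact ⟨mem.set k (PySem.List.pyGetD mem ((c.toNat : Int) - 97) 0 + 1), rfl⟩
      | none =>
        exfalso
        unfold PySem.List.pyIdx? at hidx
        rw [h26] at hidx
        split_ifs at hidx <;> simp_all <;> omega
    obtain ⟨m1, hm1⟩ := hsome
    have hm1len : m1.length = 26 := by
      unfold PySem.List.pySet? at hm1
      obtain ⟨k, _, rfl⟩ := Option.map_eq_some_iff.mp hm1
      simp [h26]
    obtain ⟨cnt, hcnt⟩ := ih m1 hm1len (fun x hx => hpre x (by simp [hx]))
    exact ⟨cnt, by rw [pvCountA, List.foldlM_cons, hm1]; exact hcnt⟩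

-- ===== VERDICT (by name: the statements are the Claim_ definitions above) =====
theorem sortString_spec : Claim_unchanged_sortString := by
  intro s _ hpre
  intro hnd
  have hlow : ∀ c ∈ s.toList, 97 ≤ c.toNat ∧ c.toNat ≤ 122 := by
    intro c hc
    have h1 : pvPreChar c = true := by
      have := (List.all_eq_true.mp hpre) c hc
      exact this
    unfold pvPreChar at h1
    have h2 : ¬ (c.toNat < 97) := by
      intro hlt
      apply hnd
      unfold D_sortString
      rw [List.any_eq_true]
      exact ⟨c, hc, by simpa using hlt⟩
    simp only [Bool.and_eq_true, decide_eq_true_eq] at h1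
    omega
  have hzlen : ((PySem.List.pyRange 0 26 1).map (fun _ => (0 : Int))).length = 26 := by decide
  obtain ⟨cnt, hcnt, hval⟩ := pvCount_lower s.toList _ hzlen hlow
  have hval' : ∀ j : Int, 0 ≤ j → j < 26 →
      PySem.List.pyGetD cnt j 0 = (s.toList.countP (fun c => ((c.toNat : Int) - 97) == j) : Int) := by
    intro j hj0 hj1
    rw [hval j hj0 hj1]
    have : PySem.List.pyGetD ((PySem.List.pyRange 0 26 1).map (fun _ => (0 : Int))) j 0 = 0 := by
      rw [pvGetD_nn _ j hj0 (by rw [hzlen]; exact_mod_cast hj1), List.getElem_map]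
    rw [this]
    ring
  have h26 : cnt.length = 26 := by
    obtain ⟨hl, _, _⟩ := pvCount_spec _ _ _ hcnt
    rw [hl, hzlen]
  rw [pvA_rounds s cnt hcnt, pvB_rounds s cnt hlow h26 hval']

set_option maxRecDepth 4000 in
theorem sortString_changed : Claim_changed_sortString := by
  unfold Claim_changed_sortString
  decide

theorem sortString_tight : Claim_exact_sortString := by
  intro s _ hpre hd
  intro heq
  unfold D_sortString at hd
  obtain ⟨c, hc, hlt⟩ := List.any_eq_true.mp hd
  have hlt' : c.toNat < 97 := by simpa using hlt
  -- Pre_ gives pvCountA succeeds, so A's output characters are all ≥ 97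
  have hpre' : ∀ x ∈ s.toList, 71 ≤ x.toNat ∧ x.toNat ≤ 122 := by
    intro x hx
    have h1 := (List.all_eq_true.mp hpre) x hx
    unfold pvPreChar at h1
    simp only [Bool.and_eq_true, decide_eq_true_eq] at h1
    omega
  have hzlen : ((PySem.List.pyRange 0 26 1).map (fun _ => (0 : Int))).length = 26 := by decide
  obtain ⟨cnt, hcnt⟩ := pvCountA_pre s.toList _ hzlen hpre'
  have hA : sortString s = String.ofList (pvRounds cnt 0) := pvA_rounds s cnt hcnt
  -- c is in B's output
  have hcB : c ∈ (sortString_alt s).toList := pvB_mem s c hc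
  rw [← heq, hA] at hcB
  rw [String.toList_ofList] at hcB
  have := pvRounds_chars cnt 0 c hcB
  omega
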